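-- pv_equiv track=rewrite | github.com/jectrafts/tonnetz-squares-eulars-musical-madness- | main.py | fibonacci_pattern
-- ===== SOURCE A (Python) =====
-- steps = 10
--
-- def fibonacci_pattern(rows2, cols2, steps=20):
--     fib_seq = [0, 1]
--     while len(fib_seq) < (steps * 2):
-- # enough values for positions
--         fib_seq.append(fib_seq[-1] + fib_seq[-2])
--
--     path = []
--     i = 0
--     while len(path) < steps and i < len(fib_seq) - 1:
--         row = fib_seq[i] % rows2
--         col = fib_seq[i + 1] % cols2
--         pos = (row, col)
--         if pos not in path:
--             path.append(pos)
--         i += 1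
--
--     return path
-- ===== SOURCE B (Python) =====
-- def fibonacci_pattern(rows2, cols2, steps=20):
--     # single pass: generate Fibonacci pairs inline, no precomputed table
--     path = []
--     a, b = 0, 1
--     i = 0
--     while len(path) < steps and i < steps * 2 - 1:
--         pos = (a % rows2, b % cols2)
--         if pos not in path:
--             path.append(pos)
--         a, b = b, a + b
--         i += 1
--     return path
-- ===== Notes on version B (the rewrite author's own statement) =====
-- stated objective: simpler
-- what changed: B drops A's precomputed Fibonacci table and its separate build loop, generating the Fibonacci pair (a,b) inline in the single loop that builds the path.
-- outside the precondition, e.g. on fibonacci_pattern(0, 3, 2): A raises ZeroDivisionError, B raises ZeroDivisionError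
import Mathlib
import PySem

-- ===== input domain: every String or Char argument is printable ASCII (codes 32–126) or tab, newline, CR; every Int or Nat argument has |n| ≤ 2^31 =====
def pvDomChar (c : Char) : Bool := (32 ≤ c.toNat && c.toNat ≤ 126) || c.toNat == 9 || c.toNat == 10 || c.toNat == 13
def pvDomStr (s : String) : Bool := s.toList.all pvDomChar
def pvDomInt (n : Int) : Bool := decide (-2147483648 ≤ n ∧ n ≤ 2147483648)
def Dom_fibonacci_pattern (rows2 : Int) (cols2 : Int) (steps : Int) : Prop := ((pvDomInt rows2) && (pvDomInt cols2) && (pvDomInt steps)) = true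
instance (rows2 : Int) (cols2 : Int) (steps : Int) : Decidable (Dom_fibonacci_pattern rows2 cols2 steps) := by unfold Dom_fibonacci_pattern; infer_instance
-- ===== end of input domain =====

-- B removes A's precomputed Fibonacci table: the Fibonacci pair is advanced inline in the single path-building loop (objective: simpler).

-- ===== PORT A =====
-- while len(fib_seq) < steps*2: fib_seq.append(fib_seq[-1] + fib_seq[-2])
-- (indexing uses pyGetD with default 0; the indices -1/-2 are always in range since the list starts at length 2)
def fibA_build (n : Int) (seq : List Int) : List Int :=
  if _h : (seq.length : Int) < n then
    fibA_build n (seq ++ [PySem.List.pyGetD seq (-1) 0 + PySem.List.pyGetD seq (-2) 0])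
  else seq
termination_by (n - seq.length).toNat
decreasing_by simp; omega

-- while len(path) < steps and i < len(fib_seq) - 1: …
def fibA_loop (rows2 cols2 steps : Int) (fib : List Int) (path : List (List Int)) (i : Int) : List (List Int) :=
  if _h : (path.length : Int) < steps ∧ i < (fib.length : Int) - 1 then
    let row := PySem.Int.mod (PySem.List.pyGetD fib i 0) rows2
    let col := PySem.Int.mod (PySem.List.pyGetD fib (i + 1) 0) cols2
    let pos := [row, col]
    fibA_loop rows2 cols2 steps fib (if pos ∈ path then path else path ++ [pos]) (i + 1)
  else path
termination_by ((fib.length : Int) - 1 - i).toNat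
decreasing_by omega

def fibonacci_pattern (rows2 : Int) (cols2 : Int) (steps : Int) : List (List Int) :=
  fibA_loop rows2 cols2 steps (fibA_build (steps * 2) [0, 1]) [] 0

-- ===== PORT B =====
-- while len(path) < steps and i < steps*2 - 1: pos = (a % rows2, b % cols2); …; a, b = b, a + b; i += 1
def fibB_loop (rows2 cols2 steps a b i : Int) (path : List (List Int)) : List (List Int) :=
  if _h : (path.length : Int) < steps ∧ i < steps * 2 - 1 then
    let pos := [PySem.Int.mod a rows2, PySem.Int.mod b cols2]
    fibB_loop rows2 cols2 steps b (a + b) (i + 1) (if pos ∈ path then path else path ++ [pos])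
  else path
termination_by (steps * 2 - 1 - i).toNat
decreasing_by omega

def fibonacci_pattern_alt (rows2 : Int) (cols2 : Int) (steps : Int) : List (List Int) :=
  fibB_loop rows2 cols2 steps 0 1 0 []

-- ===== PRECONDITION & SPEC =====
-- Pre_ excludes only the inputs on which Python A raises ZeroDivisionError: steps ≥ 1 with rows2 = 0 or cols2 = 0.
def Pre_fibonacci_pattern (rows2 : Int) (cols2 : Int) (steps : Int) : Prop :=
  1 ≤ steps → (rows2 ≠ 0 ∧ cols2 ≠ 0)
instance (rows2 : Int) (cols2 : Int) (steps : Int) : Decidable (Pre_fibonacci_pattern rows2 cols2 steps) := by unfold Pre_fibonacci_pattern; infer_instance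

def pvWitness_fibonacci_pattern : Int × Int × Int := (3, 4, 6)

def Spec_fibonacci_pattern (rows2 : Int) (cols2 : Int) (steps : Int) (out : List (List Int)) : Prop := out = fibonacci_pattern_alt rows2 cols2 steps
instance (rows2 : Int) (cols2 : Int) (steps : Int) (out : List (List Int)) : Decidable (Spec_fibonacci_pattern rows2 cols2 steps out) := by unfold Spec_fibonacci_pattern; infer_instance

-- ===== CLAIM (what is proved, stated in full; the proofs are below) =====
def Claim_equal_fibonacci_pattern : Prop := ∀ (rows2 : Int) (cols2 : Int) (steps : Int), Dom_fibonacci_pattern rows2 cols2 steps → Pre_fibonacci_pattern rows2 cols2 steps → Spec_fibonacci_pattern rows2 cols2 steps (fibonacci_pattern rows2 cols2 steps)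

-- ===== LEMMAS AND PROOFS =====

-- the mathematical Fibonacci sequence, used only by the proofs
def fibM : Nat → Int
  | 0 => 0
  | 1 => 1
  | n + 2 => fibM (n + 1) + fibM n

theorem fibA_build_char (n : Int) (m k : Nat) (hk : 2 ≤ k) (hm : (n - (k : Int)).toNat = m) :
    fibA_build n ((List.range k).map fibM) = (List.range (max k n.toNat)).map fibM := by
  induction m generalizing k with
  | zero =>
    rw [fibA_build, dif_neg (by simp; omega), show max k n.toNat = k by omega]
  | succ m ih =>
    rw [fibA_build]
    have hlt : (((List.range k).map fibM).length : Int) < n := by simp; omega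
    simp only [hlt, dite_true]
    have hlen : ((List.range k).map fibM).length = k := by simp
    have hkn : (k : Int) < n := by simpa using hlt
    have h1 : PySem.List.pyGetD ((List.range k).map fibM) (-1) 0 = fibM (k - 1) := by
      rw [show (-1 : Int) = -((1 : Nat) : Int) by simp,
          PySem.List.pyGetD_neg_natCast _ _ _ (by omega) (by omega)]
      simp [hlen]
    have h2 : PySem.List.pyGetD ((List.range k).map fibM) (-2) 0 = fibM (k - 2) := by
      rw [show (-2 : Int) = -((2 : Nat) : Int) by simp,
          PySem.List.pyGetD_neg_natCast _ _ _ (by omega) (by omega)]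
      simp [hlen]
    have hfib : fibM (k - 1) + fibM (k - 2) = fibM k := by
      obtain ⟨j, rfl⟩ : ∃ j, k = j + 2 := ⟨k - 2, by omega⟩
      simp [fibM]
    rw [h1, h2, hfib,
        show (List.range k).map fibM ++ [fibM k] = (List.range (k + 1)).map fibM by
          rw [List.range_succ]; simp]
    have hmm : (n - ((k + 1 : Nat) : Int)).toNat = m := by push_cast; omega
    rw [ih (k + 1) (by omega) hmm, show max (k + 1) n.toNat = max k n.toNat by omega]

theorem loop_sim (rows2 cols2 steps : Int) (F : List Int) (hF : (F.length : Int) = steps * 2)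
    (hget : ∀ j : Nat, (j : Int) < steps * 2 → PySem.List.pyGetD F (j : Int) 0 = fibM j) :
    ∀ (fuel : Nat) (i : Nat) (path : List (List Int)), (steps * 2 - 1 - (i : Int)).toNat = fuel →
    fibA_loop rows2 cols2 steps F path (i : Int) = fibB_loop rows2 cols2 steps (fibM i) (fibM (i + 1)) (i : Int) path := by
  intro fuel
  induction fuel with
  | zero =>
    intro i path hfuel
    rw [fibA_loop, fibB_loop]
    have : ¬ ((i : Int) < steps * 2 - 1) := by omega
    have hA : ¬ ((path.length : Int) < steps ∧ (i : Int) < (F.length : Int) - 1) := by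
      rw [hF]; tauto
    have hB : ¬ ((path.length : Int) < steps ∧ (i : Int) < steps * 2 - 1) := by tauto
    simp only [hA, hB, dite_false]
  | succ fuel ih =>
    intro i path hfuel
    rw [fibA_loop, fibB_loop]
    by_cases hp : (path.length : Int) < steps
    · by_cases hi : (i : Int) < steps * 2 - 1
      · have hA : (path.length : Int) < steps ∧ (i : Int) < (F.length : Int) - 1 := by
          rw [hF]; exact ⟨hp, hi⟩
        have hB : (path.length : Int) < steps ∧ (i : Int) < steps * 2 - 1 := ⟨hp, hi⟩
        simp only [hA, hB, and_self, dite_true]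
        have g1 : PySem.List.pyGetD F (i : Int) 0 = fibM i := hget i (by omega)
        have g2 : PySem.List.pyGetD F ((i : Int) + 1) 0 = fibM (i + 1) := by
          have := hget (i + 1) (by push_cast; omega)
          push_cast at this
          exact this
        rw [g1, g2]
        have : ((i : Int) + 1) = ((i + 1 : Nat) : Int) := by push_cast; ring
        rw [this, ih (i + 1) _ (by push_cast; omega),
            show fibM (i + 1 + 1) = fibM i + fibM (i + 1) by simp [fibM]; ring]
      · have hA : ¬ ((path.length : Int) < steps ∧ (i : Int) < (F.length : Int) - 1) := by
          rw [hF]; tauto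
        have hB : ¬ ((path.length : Int) < steps ∧ (i : Int) < steps * 2 - 1) := by tauto
        simp only [hA, hB, dite_false]
    · have hA : ¬ ((path.length : Int) < steps ∧ (i : Int) < (F.length : Int) - 1) := by tauto
      have hB : ¬ ((path.length : Int) < steps ∧ (i : Int) < steps * 2 - 1) := by tauto
      simp only [hA, hB, dite_false]

-- ===== VERDICT (by name: the statement is the Claim_ definition above) =====
theorem fibonacci_pattern_spec : Claim_equal_fibonacci_pattern := by
  intro rows2 cols2 steps _ _
  unfold Spec_fibonacci_pattern fibonacci_pattern fibonacci_pattern_alt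
  by_cases hs : 1 ≤ steps
  · have h2 : ([0, 1] : List Int) = (List.range 2).map fibM := by decide
    have hbuild : fibA_build (steps * 2) ((List.range 2).map fibM)
        = (List.range (max 2 (steps * 2).toNat)).map fibM :=
      fibA_build_char (steps * 2) (steps * 2 - 2).toNat 2 (by omega) (by omega)
    have hmax : max 2 (steps * 2).toNat = (steps * 2).toNat := by omega
    rw [h2, hbuild, hmax]
    have hF : (((List.range (steps * 2).toNat).map fibM).length : Int) = steps * 2 := by
      simp; omega
    have hget : ∀ j : Nat, (j : Int) < steps * 2 →
        PySem.List.pyGetD ((List.range (steps * 2).toNat).map fibM) (j : Int) 0 = fibM j := by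
      intro j hj
      rw [PySem.List.pyGetD_natCast]
      have hjM : j < (steps * 2).toNat := by omega
      simp [List.getD, hjM]
    have := loop_sim rows2 cols2 steps _ hF hget (steps * 2 - 1).toNat 0 [] (by simp)
    simpa using this
  · rw [fibA_loop, fibB_loop]
    have hA : ¬ ((([] : List (List Int)).length : Int) < steps ∧
        (0 : Int) < (((fibA_build (steps * 2) [0, 1]).length : Int)) - 1) := by
      simp; intro h; omega
    have hB : ¬ ((([] : List (List Int)).length : Int) < steps ∧ (0 : Int) < steps * 2 - 1) := by
      simp; intro h; omega
    simp only [hA, hB, dite_false]
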